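-- pv_equiv track=rewrite | github.com/frigorific44/nametables | src/tableutility.py | get_rranges
-- ===== SOURCE A (Python) =====
-- def get_rranges(weights):
--     rranges = []
--     i = 0
--     for weight in weights:
--         lower = i + 1
--         i += weight
--         rranges.append([lower, i])
--     return rranges
-- ===== SOURCE B (Python) =====
-- from itertools import accumulate
--
-- def get_rranges(weights):
--     uppers = list(accumulate(weights))
--     lowers = [1] + [u + 1 for u in uppers[:-1]]
--     return [[lo, hi] for lo, hi in zip(lowers, uppers)]
-- ===== Notes on version B (the rewrite author's own statement) =====
-- stated objective: alternative
-- what changed: Replaces A's single running-accumulator loop with a table decomposition: build the prefix-sum uppers via itertools.accumulate, derive lowers by shifting, then zip the two tables into pairs.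
import Mathlib
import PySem

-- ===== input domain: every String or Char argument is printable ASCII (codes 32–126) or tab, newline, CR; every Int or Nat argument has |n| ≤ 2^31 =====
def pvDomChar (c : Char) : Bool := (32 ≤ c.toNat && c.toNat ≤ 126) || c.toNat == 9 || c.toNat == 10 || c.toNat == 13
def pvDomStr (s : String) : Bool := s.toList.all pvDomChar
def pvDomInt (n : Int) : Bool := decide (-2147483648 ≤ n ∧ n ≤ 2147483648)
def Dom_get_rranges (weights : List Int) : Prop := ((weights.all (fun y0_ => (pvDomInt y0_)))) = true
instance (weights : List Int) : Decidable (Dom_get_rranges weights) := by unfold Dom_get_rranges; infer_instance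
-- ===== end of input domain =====

-- B replaces A's single running-accumulator loop with a prefix-sum-table-then-zip decomposition (alternative, same cost).


-- ===== PORT A =====
-- A: running accumulator i; append [i+1, i+weight] each step.
def get_rranges (weights : List Int) : List (List Int) :=
  (weights.foldl (fun (st : List (List Int) × Int) w =>
      (st.1 ++ [[st.2 + 1, st.2 + w]], st.2 + w)) ([], 0)).1

-- ===== PORT B =====
-- B: prefix-sum table (itertools.accumulate), shifted lowers, then zip.
def pvAccumulate (acc : Int) : List Int → List Int
  | [] => []
  | w :: ws => (acc + w) :: pvAccumulate (acc + w) ws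

def get_rranges_alt (weights : List Int) : List (List Int) :=
  let uppers := pvAccumulate 0 weights
  let lowers := 1 :: uppers.dropLast.map (· + 1)
  (lowers.zip uppers).map (fun p => [p.1, p.2])

-- ===== PRECONDITION & SPEC =====
def Spec_get_rranges (weights : List Int) (out : List (List Int)) : Prop := out = get_rranges_alt weights
instance (weights : List Int) (out : List (List Int)) : Decidable (Spec_get_rranges weights out) := by unfold Spec_get_rranges; infer_instance

-- ===== CLAIM (what is proved, stated in full; the proofs are below) =====
def Claim_equal_get_rranges : Prop := ∀ (weights : List Int), Dom_get_rranges weights → Spec_get_rranges weights (get_rranges weights)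

-- ===== LEMMAS AND PROOFS =====

-- ===== VERDICT (by name: the statement is the Claim_ definition above) =====
-- gen i ws: the common specification of both ports starting at accumulator i.
def pvGen (i : Int) : List Int → List (List Int)
  | [] => []
  | w :: ws => [i + 1, i + w] :: pvGen (i + w) ws

theorem foldA_eq_gen : ∀ (ws : List Int) (acc : List (List Int)) (i : Int),
    (ws.foldl (fun (st : List (List Int) × Int) w =>
      (st.1 ++ [[st.2 + 1, st.2 + w]], st.2 + w)) (acc, i)).1 = acc ++ pvGen i ws := by
  intro ws
  induction ws with
  | nil => intro acc i; simp [pvGen]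
  | cons w ws ih => intro acc i; simp [List.foldl, pvGen, ih, List.append_assoc]

theorem zip_eq_gen : ∀ (ws : List Int) (i : Int),
    (((i + 1) :: (pvAccumulate i ws).dropLast.map (· + 1)).zip
      (pvAccumulate i ws)).map (fun p => [p.1, p.2]) = pvGen i ws := by
  intro ws
  induction ws with
  | nil => intro i; simp [pvAccumulate, pvGen]
  | cons w ws ih =>
    intro i
    cases ws with
    | nil => simp [pvAccumulate, pvGen]
    | cons w' ws' =>
      have h := ih (i + w)
      simp only [pvAccumulate, pvGen, List.dropLast_cons₂, List.map_cons, List.zip_cons_cons,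
        List.map] at h ⊢
      exact congrArg (List.cons _) h

theorem get_rranges_spec : Claim_equal_get_rranges := by
  intro weights _
  unfold Spec_get_rranges get_rranges get_rranges_alt
  rw [foldA_eq_gen, ← zip_eq_gen weights 0]
  simp
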